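-- pv_equiv track=rewrite | github.com/jimjimvalkema/BigDataComputingVoorJippie | opdrachten/opdracht2.py | calc_totals_from_lines
-- ===== SOURCE A (Python) =====
-- def calc_totals_from_lines(translated_lines):
--     totals = []
--     for line in translated_lines:
--         for i, val in enumerate(line):
--             if len(totals) < i + 1:
--                 totals.append([val, 1])
--             else:
--                 totals[i][0] += val
--                 totals[i][1] += 1
--     return totals
-- ===== SOURCE B (Python) =====
-- def calc_totals_from_lines(translated_lines):
--     maxlen = max((len(line) for line in translated_lines), default=0)
--     totals = []
--     for i in range(maxlen):
--         vals = [line[i] for line in translated_lines if len(line) > i]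
--         totals.append([sum(vals), len(vals)])
--     return totals
-- ===== Notes on version B (the rewrite author's own statement) =====
-- stated objective: alternative
-- what changed: Replaces A's row-major accumulator (per-element append-or-update of totals[i]) with a column-major traversal: compute the maximum line length once, then build each totals entry directly as the sum and count of that column via a comprehension.
import Mathlib
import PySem

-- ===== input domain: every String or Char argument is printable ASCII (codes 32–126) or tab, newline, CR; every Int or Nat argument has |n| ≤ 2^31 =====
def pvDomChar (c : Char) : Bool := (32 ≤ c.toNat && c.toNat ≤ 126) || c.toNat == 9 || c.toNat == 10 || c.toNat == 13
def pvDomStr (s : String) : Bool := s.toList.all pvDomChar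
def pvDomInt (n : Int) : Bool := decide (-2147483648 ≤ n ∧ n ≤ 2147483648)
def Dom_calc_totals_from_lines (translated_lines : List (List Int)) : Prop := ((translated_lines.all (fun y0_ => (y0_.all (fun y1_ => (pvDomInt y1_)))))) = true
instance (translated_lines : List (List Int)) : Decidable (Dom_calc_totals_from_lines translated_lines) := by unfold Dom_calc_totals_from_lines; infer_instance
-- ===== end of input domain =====

-- B replaces A's row-major accumulator with a column-major traversal (each totals entry is
-- built directly as sum and count of its column); proved to return the same value on every input.

-- ===== PORT A =====
-- one enumerate step of A's inner loop: append [val,1] or update totals[i] in place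
def pvStepA (tot : List (List Int)) (p : Int × Int) : List (List Int) :=
  if (tot.length : Int) < p.1 + 1 then tot ++ [[p.2, 1]]
  else
    -- totals[i][0] += val; totals[i][1] += 1  (indices always in range here)
    let t := PySem.List.pyGetD tot p.1 []
    let t1 := PySem.List.pySetD t 0 (PySem.List.pyGetD t 0 0 + p.2)
    let t2 := PySem.List.pySetD t1 1 (PySem.List.pyGetD t1 1 0 + 1)
    PySem.List.pySetD tot p.1 t2

def calc_totals_from_lines (translated_lines : List (List Int)) : List (List Int) :=
  translated_lines.foldl (fun totals line =>
    (PySem.List.enumerate line 0).foldl pvStepA totals) []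

-- ===== PORT B =====
def calc_totals_from_lines_alt (translated_lines : List (List Int)) : List (List Int) :=
  let maxlen := translated_lines.foldl (fun m line => max m line.length) 0
  (List.range maxlen).map (fun i =>
    let vals := (translated_lines.filter (fun line => i < line.length)).map
      (fun line => line.getD i 0)
    [vals.sum, (vals.length : Int)])

-- ===== PRECONDITION & SPEC =====
def Spec_calc_totals_from_lines (translated_lines : List (List Int)) (out : List (List Int)) : Prop := out = calc_totals_from_lines_alt translated_lines
instance (translated_lines : List (List Int)) (out : List (List Int)) : Decidable (Spec_calc_totals_from_lines translated_lines out) := by unfold Spec_calc_totals_from_lines; infer_instance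

-- ===== CLAIM (what is proved, stated in full; the proofs are below) =====
def Claim_equal_calc_totals_from_lines : Prop := ∀ (translated_lines : List (List Int)), Dom_calc_totals_from_lines translated_lines → Spec_calc_totals_from_lines translated_lines (calc_totals_from_lines translated_lines)

-- ===== LEMMAS AND PROOFS =====

-- merge one line into a running totals table (the common value of both ports' per-line step)
def pvMerge : List (List Int) → List Int → List (List Int)
  | ts, [] => ts
  | [], v :: vs => [v, 1] :: pvMerge [] vs
  | t :: ts, v :: vs => [t.getD 0 0 + v, t.getD 1 0 + 1] :: pvMerge ts vs

def pvWF (tot : List (List Int)) : Prop := ∀ t ∈ tot, ∃ s c : Int, t = [s, c]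

theorem pvStepA_update (tot : List (List Int)) (k : Nat) (v s c : Int) (hlt : k < tot.length)
    (hsc : tot[k] = [s, c]) :
    pvStepA tot ((k : Int), v) = tot.set k [s + v, c + 1] := by
  unfold pvStepA
  have hc : ¬ ((tot.length : Int) < (k : Int) + 1) := by exact_mod_cast Nat.not_lt.mpr hlt
  rw [if_neg hc]
  simp [hsc, hlt, PySem.List.pySetD, PySem.List.pyGetD, PySem.List.pyGet?,
    PySem.List.pyIdx?, PySem.List.pySet?]

theorem pvInner_spec (l : List Int) : ∀ (tot : List (List Int)) (k : Nat),
    k ≤ tot.length → pvWF tot →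
    (PySem.List.enumerate l (k : Int)).foldl pvStepA tot
      = tot.take k ++ pvMerge (tot.drop k) l := by
  induction l with
  | nil => intro tot k hk _; simp [PySem.List.enumerate_nil, pvMerge]
  | cons v vs ih =>
    intro tot k hk hwf
    rw [PySem.List.enumerate_cons, List.foldl_cons]
    rcases Nat.lt_or_ge k tot.length with hlt | hge
    · -- update branch
      obtain ⟨s, c, hsc⟩ := hwf tot[k] (List.getElem_mem hlt)
      rw [pvStepA_update tot k v s c hlt hsc]
      have h1 : ((k : Int) + 1) = ((k + 1 : Nat) : Int) := by push_cast; ring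
      rw [h1, ih (tot.set k [s + v, c + 1]) (k + 1) (by simpa using hlt)]
      · have hdrop : tot.drop k = [s, c] :: tot.drop (k + 1) :=
          List.drop_eq_getElem_cons hlt |>.trans (by rw [hsc])
        rw [hdrop]
        show _ = tot.take k ++ ([(List.getD [s,c] 0 0) + v, (List.getD [s,c] 1 0) + 1] :: pvMerge (tot.drop (k+1)) vs)
        have hset : tot.set k [s + v, c + 1] = tot.take k ++ [s + v, c + 1] :: tot.drop (k + 1) :=
          List.set_eq_take_append_cons_drop .. |>.trans (by rw [if_pos hlt])
        rw [hset]
        simp [List.take_append, List.drop_append, List.length_take, Nat.min_eq_left hlt.le,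
          List.take_succ_cons, List.drop_succ_cons]
        rw [List.take_take, Nat.min_eq_right (by omega),
          List.drop_eq_nil_of_le (by simp [List.length_take])]
        simp
      · intro t ht
        rcases List.mem_or_eq_of_mem_set ht with h | h
        · exact hwf t h
        · exact ⟨s + v, c + 1, h⟩
    · -- append branch
      have hkeq : k = tot.length := le_antisymm hk hge
      have hstep : pvStepA tot ((k : Int), v) = tot ++ [[v, 1]] := by
        unfold pvStepA
        rw [if_pos (by exact_mod_cast by omega : (tot.length : Int) < (k : Int) + 1)]
      rw [hstep]
      have h1 : ((k : Int) + 1) = ((k + 1 : Nat) : Int) := by push_cast; ring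
      rw [h1, ih (tot ++ [[v, 1]]) (k + 1) (by simp [hkeq])]
      · subst hkeq
        rw [List.take_of_length_le (by simp), List.drop_eq_nil_of_le (by simp)]
        simp [pvMerge]
      · intro t ht
        rcases List.mem_append.mp ht with h | h
        · exact hwf t h
        · exact ⟨v, 1, by simpa using h⟩

theorem pv_foldl_max_le (ls : List (List Int)) : ∀ (m : Nat),
    m ≤ ls.foldl (fun m l => max m l.length) m := by
  induction ls with
  | nil => simp
  | cons x xs ih =>
    intro m
    exact le_trans (le_max_left m x.length) (ih _)

theorem pv_le_maxlen' (ls : List (List Int)) : ∀ (m : Nat) (line : List Int), line ∈ ls →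
    line.length ≤ ls.foldl (fun m l => max m l.length) m := by
  induction ls with
  | nil => intro m line h; cases h
  | cons x xs ih =>
    intro m line h
    rcases List.mem_cons.mp h with rfl | h'
    · calc line.length ≤ max m line.length := le_max_right _ _
        _ ≤ _ := pv_foldl_max_le xs _
    · exact ih _ _ h'

theorem pv_le_maxlen (ls : List (List Int)) (line : List Int) (h : line ∈ ls) :
    line.length ≤ ls.foldl (fun m l => max m l.length) 0 :=
  pv_le_maxlen' ls 0 line h

theorem pvMerge_getElem? : ∀ (T : List (List Int)) (l : List Int) (i : Nat),
    (pvMerge T l)[i]? =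
      match T[i]?, l[i]? with
      | some t, some v => some [t.getD 0 0 + v, t.getD 1 0 + 1]
      | some t, none => some t
      | none, some v => some [v, 1]
      | none, none => none := by
  intro T
  induction T with
  | nil =>
    intro l
    induction l with
    | nil => intro i; simp [pvMerge]
    | cons v vs ihl =>
      intro i
      cases i with
      | zero => simp [pvMerge]
      | succ j => simpa [pvMerge] using ihl j
  | cons t ts ihT =>
    intro l i
    cases l with
    | nil => cases h : (t :: ts)[i]? <;> simp [pvMerge, h]
    | cons v vs =>
      cases i with
      | zero => simp [pvMerge]
      | succ j => simpa [pvMerge] using ihT vs j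

theorem pvWF_alt (ls : List (List Int)) : pvWF (calc_totals_from_lines_alt ls) := by
  intro t ht
  unfold calc_totals_from_lines_alt at ht
  obtain ⟨i, _, rfl⟩ := List.mem_map.mp ht
  exact ⟨_, _, rfl⟩

theorem pvMerge_alt (ls : List (List Int)) (l : List Int) :
    pvMerge (calc_totals_from_lines_alt ls) l = calc_totals_from_lines_alt (ls ++ [l]) := by
  unfold calc_totals_from_lines_alt
  have hml : (ls ++ [l]).foldl (fun m line => max m line.length) 0
      = max (ls.foldl (fun m line => max m line.length) 0) l.length := by
    rw [List.foldl_append]; rfl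
  apply List.ext_getElem?
  intro i
  rw [pvMerge_getElem?]
  simp only [List.getElem?_map, hml, List.filter_append, List.map_append]
  by_cases hL : i < ls.foldl (fun m line => max m line.length) 0 <;>
    by_cases hl : i < l.length
  · -- both: update column
    simp [hL, hl, Nat.lt_of_lt_of_le hL (le_max_left _ _), List.filter_singleton,
      List.getD_eq_getElem?_getD]
  · -- column exists, line too short
    simp [hL, hl, Nat.lt_of_lt_of_le hL (le_max_left _ _), List.filter_singleton]
  · -- new column coming from l only
    have hnil : ls.filter (fun line => decide (i < line.length)) = [] := by
      apply List.filter_eq_nil_iff.mpr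
      intro line hline
      simp only [decide_eq_true_eq]
      exact fun hc => absurd (pv_le_maxlen ls line hline) (Nat.not_le.mpr (Nat.lt_of_le_of_lt (Nat.le_of_not_lt hL) hc))
    simp [hL, hl, Nat.lt_of_lt_of_le hl (le_max_right _ _), List.filter_singleton, hnil,
      List.getD_eq_getElem?_getD]
  · -- column does not exist at all
    have : ¬ i < max (ls.foldl (fun m line => max m line.length) 0) l.length := by omega
    simp [hL, hl, this]

theorem pv_main (ls : List (List Int)) :
    calc_totals_from_lines ls = calc_totals_from_lines_alt ls := by
  induction ls using List.reverseRecOn with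
  | nil => rfl
  | append_singleton ls l ih =>
    unfold calc_totals_from_lines
    rw [List.foldl_append, List.foldl_cons, List.foldl_nil]
    show (PySem.List.enumerate l 0).foldl pvStepA (calc_totals_from_lines ls) = _
    rw [ih]
    have h0 : (0 : Int) = ((0 : Nat) : Int) := rfl
    rw [h0, pvInner_spec l (calc_totals_from_lines_alt ls) 0 (Nat.zero_le _) (pvWF_alt ls)]
    simpa using pvMerge_alt ls l

-- ===== VERDICT (by name: the statement is the Claim_ definition above) =====
theorem calc_totals_from_lines_spec : Claim_equal_calc_totals_from_lines := by
  intro ls _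
  unfold Spec_calc_totals_from_lines
  exact pv_main ls
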